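-- pv_equiv track=rewrite | github.com/JustinHallquist/justinhallquistcom | competitive_programming/problems/codeforces/1680/C_Binary_String/1680_C_Binary_String.map.py | cost_map
-- ===== SOURCE A (Python) =====
-- def cost_map(arr, zero_cost):
--     cost_map = []
--
--     for ii in arr:
--         if ii == 1:
--             cost_map.append([1, 0])
--         elif len(cost_map):
--             cost_map[-1][1] = cost_map[-1][1] - 1
--         else:
--             cost_map.append([0, -1])
--
--     return cost_map
-- ===== SOURCE B (Python) =====
-- def cost_map(arr, zero_cost):
--     ones = [i for i, v in enumerate(arr) if v == 1]
--     if not ones: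
--         return [[0, -len(arr)]] if arr else []
--     out = [[0, -ones[0]]] if ones[0] > 0 else []
--     bounds = ones[1:] + [len(arr)]
--     for start, nxt in zip(ones, bounds):
--         out.append([1, -(nxt - start - 1)])
--     return out
-- ===== Notes on version B (the rewrite author's own statement) =====
-- stated objective: alternative
-- what changed: B replaces A's stateful single pass that mutates the last appended group with a run-structure computation: it first collects the indices of the 1-elements, emits the leading non-1 group from the first such index, and maps each consecutive pair of one-indices (closed by len(arr)) to its gap entry.
import Mathlib
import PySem

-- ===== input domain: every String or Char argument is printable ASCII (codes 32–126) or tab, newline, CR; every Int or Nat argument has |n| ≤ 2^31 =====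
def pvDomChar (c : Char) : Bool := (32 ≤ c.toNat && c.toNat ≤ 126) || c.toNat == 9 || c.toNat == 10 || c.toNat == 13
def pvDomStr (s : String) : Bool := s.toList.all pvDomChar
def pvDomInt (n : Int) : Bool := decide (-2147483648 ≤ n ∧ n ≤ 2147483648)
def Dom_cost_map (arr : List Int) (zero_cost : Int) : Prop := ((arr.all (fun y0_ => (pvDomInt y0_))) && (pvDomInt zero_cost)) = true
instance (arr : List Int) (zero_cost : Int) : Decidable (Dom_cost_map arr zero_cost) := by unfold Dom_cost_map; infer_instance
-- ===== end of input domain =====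

-- B recomputes the same cost map from the list of one-indices (runs/gaps) instead of
-- mutating the last appended group in a stateful pass; objective: alternative decomposition.

-- ===== PORT A =====
-- loop body of A's 'for ii in arr', named (the accumulator is the growing cost_map list)
def stepA (cm : List (List Int)) (ii : Int) : List (List Int) :=
  if ii = 1 then cm ++ [[1, 0]]
  else if cm.length ≠ 0 then
    -- cost_map[-1][1] = cost_map[-1][1] - 1
    PySem.List.pySetD cm (-1)
      (PySem.List.pySetD (PySem.List.pyGetD cm (-1) []) 1
        ((PySem.List.pyGetD (PySem.List.pyGetD cm (-1) []) 1 0) - 1))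
  else cm ++ [[0, -1]]

def cost_map (arr : List Int) (zero_cost : Int) : List (List Int) :=
  arr.foldl stepA []

-- ===== PORT B =====
-- ones = [i for i, v in enumerate(arr) if v == 1]
def onesIdx (arr : List Int) : List Int :=
  (PySem.List.enumerate arr 0).filterMap (fun p => if p.2 = 1 then some p.1 else none)

def cost_map_alt (arr : List Int) (zero_cost : Int) : List (List Int) :=
  match onesIdx arr with
  | [] => if arr ≠ [] then [[0, -(PySem.List.len arr)]] else []
  | o0 :: rest =>
    let out := if o0 > 0 then [[0, -o0]] else []
    let bounds := rest ++ [PySem.List.len arr]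
    ((o0 :: rest).zip bounds).foldl (fun out p => out ++ [[1, -(p.2 - p.1 - 1)]]) out

-- ===== PRECONDITION & SPEC =====
def Spec_cost_map (arr : List Int) (zero_cost : Int) (out : List (List Int)) : Prop := out = cost_map_alt arr zero_cost
instance (arr : List Int) (zero_cost : Int) (out : List (List Int)) : Decidable (Spec_cost_map arr zero_cost out) := by unfold Spec_cost_map; infer_instance

-- ===== CLAIM (what is proved, stated in full; the proofs are below) =====
def Claim_equal_cost_map : Prop := ∀ (arr : List Int) (zero_cost : Int), Dom_cost_map arr zero_cost → Spec_cost_map arr zero_cost (cost_map arr zero_cost)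

-- ===== LEMMAS AND PROOFS =====

-- one gap entry of B's final loop
def gapEntry (p : Int × Int) : List Int := [1, -(p.2 - p.1 - 1)]

-- B's result as a function of the one-index list and the length alone
def costB (os : List Int) (n : Int) : List (List Int) :=
  match os with
  | [] => if n ≠ 0 then [[0, -n]] else []
  | o0 :: rest =>
    (if o0 > 0 then [[0, -o0]] else []) ++ ((o0 :: rest).zip (rest ++ [n])).map gapEntry

theorem alt_eq_costB (arr : List Int) (z : Int) :
    cost_map_alt arr z = costB (onesIdx arr) (arr.length : Int) := by
  unfold cost_map_alt costB
  cases h : onesIdx arr with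
  | nil =>
    simp only [PySem.List.len_eq]
    by_cases ha : arr = [] <;> simp [ha]
  | cons o0 rest =>
    simp only [PySem.List.len_eq, PySem.List.foldl_append_singleton_eq_map]
    rfl

theorem stepA_one (cm : List (List Int)) : stepA cm 1 = cm ++ [[1, 0]] := by
  simp [stepA]

theorem stepA_nil (x : Int) (hx : x ≠ 1) : stepA [] x = [[0, -1]] := by
  simp [stepA, hx]

theorem stepA_snoc (xs : List (List Int)) (a b x : Int) (hx : x ≠ 1) :
    stepA (xs ++ [[a, b]]) x = xs ++ [[a, b - 1]] := by
  simp [stepA, hx, PySem.List.pyGetD,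
        PySem.List.pySetD, PySem.List.pySet?, PySem.List.pyIdx?, List.set_append]

theorem enumerate_snoc (arr : List Int) (x : Int) :
    ∀ s : Int, PySem.List.enumerate (arr ++ [x]) s
      = PySem.List.enumerate arr s ++ [(s + (arr.length : Int), x)] := by
  induction arr with
  | nil => intro s; simp [PySem.List.enumerate]
  | cons a t ih =>
    intro s
    simp only [List.cons_append, PySem.List.enumerate, ih (s + 1), List.length_cons]
    push_cast
    ring_nf

theorem ones_snoc (arr : List Int) (x : Int) :
    onesIdx (arr ++ [x]) = onesIdx arr ++ (if x = 1 then [(arr.length : Int)] else []) := by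
  unfold onesIdx
  rw [enumerate_snoc arr x 0, List.filterMap_append]
  by_cases hx : x = 1 <;> simp [hx]

-- the gap list for bounds closed by n, and by n+1, differ only in the last entry
theorem gaps_bump (rest : List Int) : ∀ (o0 n : Int),
    ∃ C L, ((o0 :: rest).zip (rest ++ [n])).map gapEntry = C ++ [[1, -(n - L - 1)]] ∧
      ((o0 :: rest).zip (rest ++ [n + 1])).map gapEntry = C ++ [[1, -(n + 1 - L - 1)]] := by
  induction rest with
  | nil =>
    intro o0 n
    exact ⟨[], o0, by simp [gapEntry], by simp [gapEntry]⟩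
  | cons r rs ih =>
    intro o0 n
    obtain ⟨C, L, h1, h2⟩ := ih r n
    exact ⟨gapEntry (o0, r) :: C, L, by simp [h1], by simp [h2]⟩

theorem costB_snoc (os : List Int) (m : Nat) (x : Int) :
    costB (os ++ (if x = 1 then [(m : Int)] else [])) ((m : Int) + 1)
      = stepA (costB os (m : Int)) x := by
  by_cases hx : x = 1
  · subst hx
    rw [if_pos rfl, stepA_one]
    cases os with
    | nil =>
      by_cases hm : (m : Int) = 0
      · rw [List.nil_append, hm]
        norm_num [costB, gapEntry]
      · have hpos : (0 : Int) < (m : Int) := by omega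
        rw [List.nil_append]
        have hm' : m ≠ 0 := by omega
        norm_num [costB, gapEntry, hm, hpos, hm', Nat.pos_of_ne_zero hm']
    | cons o0 rest =>
      simp only [List.cons_append, costB]
      rw [show o0 :: (rest ++ [(m : Int)]) = (o0 :: rest) ++ [(m : Int)] from rfl,
          List.zip_append (by simp)]
      norm_num [gapEntry, List.append_assoc]
  · rw [if_neg hx, List.append_nil]
    cases os with
    | nil =>
      by_cases hm : (m : Int) = 0
      · rw [hm]
        norm_num [costB]
        rw [stepA_nil x hx]
      · have h1 : ((m : Int) + 1) ≠ 0 := by omega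
        simp only [costB, if_pos hm, if_pos h1, Ne]
        rw [show [[(0 : Int), -(m : Int)]] = [] ++ [[(0 : Int), -(m : Int)]] from rfl,
            stepA_snoc [] 0 (-(m : Int)) x hx]
        norm_num
        ring_nf
    | cons o0 rest =>
      simp only [costB]
      obtain ⟨C, L, h1, h2⟩ := gaps_bump rest o0 (m : Int)
      rw [h1, h2]
      conv_rhs => rw [← List.append_assoc]
      rw [stepA_snoc _ 1 (-((m : Int) - L - 1)) x hx, List.append_assoc]
      ring_nf

theorem cost_map_eq_costB (arr : List Int) (z : Int) :
    cost_map arr z = costB (onesIdx arr) (arr.length : Int) := by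
  induction arr using List.reverseRecOn with
  | nil => simp [cost_map, onesIdx, PySem.List.enumerate, costB]
  | append_singleton arr x ih =>
    have hA : cost_map (arr ++ [x]) z = stepA (cost_map arr z) x := by
      simp [cost_map, List.foldl_append]
    rw [hA, ih, ones_snoc, List.length_append, List.length_singleton]
    rw [show ((arr.length + 1 : Nat) : Int) = (arr.length : Int) + 1 by push_cast; ring]
    exact (costB_snoc (onesIdx arr) arr.length x).symm

-- ===== VERDICT (by name: the statement is the Claim_ definition above) =====
theorem cost_map_spec : Claim_equal_cost_map := by
  intro arr z _
  unfold Spec_cost_map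
  rw [cost_map_eq_costB, alt_eq_costB]
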